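-- pv_equiv track=rewrite | github.com/ultraspicy/fibonacci | circ-video-editing/zok_src/ed25519/unsafe_witness/baseline/generate_input.py | change_bit_endianness
-- ===== SOURCE A (Python) =====
-- def change_bit_endianness(input):
--     output = [0] * len(input)
--     ws = len(input) // 64
--     for i in range(ws):
--         for j in range(8):
--             for k in range(8):
--                 output[64 * i + 8*j + k] = input[64 * i + 8*(8-1-j) + k]
--     return output
-- ===== SOURCE B (Python) =====
-- def change_bit_endianness(input):
--     ws = len(input) // 64
--     output = []
--     for i in range(ws):
--         block = input[64 * i : 64 * (i + 1)]
--         for j in range(7, -1, -1):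
--             output.extend(block[8 * j : 8 * j + 8])
--     output.extend([0] * (len(input) - 64 * ws))
--     return output
-- ===== Notes on version B (the rewrite author's own statement) =====
-- stated objective: idiomatic
-- what changed: B replaces A's pre-allocated output and triple-nested per-element scatter writes (output[64*i+8*j+k] = input[...]) by building the output list block by block, appending each 64-block's eight 8-element slices in reverse chunk order and padding the tail with zeros.
import Mathlib
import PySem

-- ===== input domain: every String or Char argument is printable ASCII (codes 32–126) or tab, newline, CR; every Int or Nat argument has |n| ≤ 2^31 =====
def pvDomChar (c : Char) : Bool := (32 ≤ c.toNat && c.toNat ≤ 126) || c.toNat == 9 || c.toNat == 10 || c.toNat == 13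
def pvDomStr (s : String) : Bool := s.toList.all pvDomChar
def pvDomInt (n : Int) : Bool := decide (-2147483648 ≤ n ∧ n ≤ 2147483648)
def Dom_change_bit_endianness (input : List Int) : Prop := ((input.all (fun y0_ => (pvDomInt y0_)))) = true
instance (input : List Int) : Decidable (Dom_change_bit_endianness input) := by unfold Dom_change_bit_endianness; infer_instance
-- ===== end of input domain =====

-- B rebuilds the output block by block from whole 8-element slices in reverse chunk order
-- instead of A's per-element scatter writes into a pre-allocated list (objective: idiomatic).

-- ===== PORT A =====
-- Every subscript A performs is in range (index < 64*ws ≤ len(input)), so the total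
-- forms pySetD / pyGetD are exact here; A is total.
def change_bit_endianness (input : List Int) : List Int :=
  let output := List.replicate input.length (0 : Int)
  let ws : Int := PySem.Int.floordiv (input.length : Int) 64
  (PySem.List.pyRange 0 ws 1).foldl (fun output i =>
    (PySem.List.pyRange 0 8 1).foldl (fun output j =>
      (PySem.List.pyRange 0 8 1).foldl (fun output k =>
        PySem.List.pySetD output (64 * i + 8 * j + k)
          (PySem.List.pyGetD input (64 * i + 8 * (8 - 1 - j) + k) 0)) output) output) output

-- ===== PORT B =====
def change_bit_endianness_alt (input : List Int) : List Int :=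
  let ws : Int := PySem.Int.floordiv (input.length : Int) 64
  let output :=
    (PySem.List.pyRange 0 ws 1).foldl (fun output i =>
      let block := PySem.List.slice input (some (64 * i)) (some (64 * (i + 1)))
      (PySem.List.pyRange 7 (-1) (-1)).foldl (fun output j =>
        output ++ PySem.List.slice block (some (8 * j)) (some (8 * j + 8))) output) []
  output ++ List.replicate ((input.length : Int) - 64 * ws).toNat (0 : Int)

-- ===== PRECONDITION & SPEC =====
def Spec_change_bit_endianness (input : List Int) (out : List Int) : Prop := out = change_bit_endianness_alt input
instance (input : List Int) (out : List Int) : Decidable (Spec_change_bit_endianness input out) := by unfold Spec_change_bit_endianness; infer_instance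

-- ===== CLAIM (what is proved, stated in full; the proofs are below) =====
def Claim_equal_change_bit_endianness : Prop := ∀ (input : List Int), Dom_change_bit_endianness input → Spec_change_bit_endianness input (change_bit_endianness input)

-- ===== LEMMAS AND PROOFS =====

-- Common normal form: the chunk of 8 consecutive elements starting at c, and one
-- 64-block with its eight chunks in reversed order.
def pvChunk (input : List Int) (c : Nat) : List Int :=
  (List.range 8).map (fun k => input.getD (c + k) 0)

def pvBlock (input : List Int) (i : Nat) : List Int :=
  pvChunk input (64*i+56) ++ (pvChunk input (64*i+48) ++ (pvChunk input (64*i+40) ++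
  (pvChunk input (64*i+32) ++ (pvChunk input (64*i+24) ++ (pvChunk input (64*i+16) ++
  (pvChunk input (64*i+8) ++ pvChunk input (64*i)))))))

lemma pvChunk_length (input : List Int) (c : Nat) : (pvChunk input c).length = 8 := by
  simp [pvChunk]

lemma pvBlock_length (input : List Int) (i : Nat) : (pvBlock input i).length = 64 := by
  simp [pvBlock, pvChunk_length]

lemma flat_length (input : List Int) (m : Nat) :
    ((List.range m).flatMap (pvBlock input)).length = 64*m := by
  induction m with
  | zero => simp
  | succ m ih => rw [List.range_succ]; simp [ih, pvBlock_length]; ring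

-- Sequential left-to-right writes at positions b, b+1, …, b+cnt-1 replace the middle
-- segment by the written values.
lemma writeRange : ∀ (cnt : Nat) (f : Nat → Int) (b : Nat) (pre mid post : List Int),
    pre.length = b → mid.length = cnt →
    (List.range cnt).foldl (fun o t => o.set (b + t) (f t)) (pre ++ (mid ++ post))
      = (pre ++ (List.range cnt).map f) ++ post := by
  intro cnt
  induction cnt with
  | zero =>
    intro f b pre mid post hpre hmid
    have : mid = [] := List.eq_nil_of_length_eq_zero hmid
    subst this; simp
  | succ cnt ih =>
    intro f b pre mid post hpre hmid
    cases mid with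
    | nil => simp at hmid
    | cons m ms =>
      simp only [List.length_cons, Nat.add_right_cancel_iff] at hmid
      rw [List.range_succ_eq_map]
      simp only [List.foldl_cons]
      have hset : (pre ++ ((m :: ms) ++ post)).set (b + 0) (f 0)
          = (pre ++ [f 0]) ++ (ms ++ post) := by
        rw [Nat.add_zero, List.cons_append, ← hpre,
          List.set_append_right _ _ (le_refl _)]
        simp
      rw [hset, List.foldl_map]
      have := ih (fun t => f (t+1)) (b+1) (pre ++ [f 0]) ms post (by simp [hpre]) hmid
      simp only [show ∀ (o : List Int) (t : Nat), o.set (b + Nat.succ t) (f (Nat.succ t))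
          = o.set ((b+1) + t) (f (t+1)) from fun o t => by rw [Nat.succ_eq_add_one]; ring_nf]
      rw [this]
      simp [List.map_map, Function.comp]

-- One inner k-loop of A writes one chunk.
lemma chunk_step (input : List Int) (bi ci : Int) (b c : Nat) (pre mid rest : List Int)
    (hb : bi = (b : Int)) (hc : ci = (c : Int)) (hpre : pre.length = b) (hmid : mid.length = 8) :
    (PySem.List.pyRange 0 8 1).foldl
      (fun out k => PySem.List.pySetD out (bi + k) (PySem.List.pyGetD input (ci + k) 0))
      (pre ++ (mid ++ rest))
    = (pre ++ pvChunk input c) ++ rest := by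
  subst hb hc
  rw [show (8:Int) = ((8:Nat):Int) by norm_num, PySem.List.pyRange_zero_natCast, List.foldl_map]
  have hbody : ∀ (o : List Int) (t : Nat),
      PySem.List.pySetD o ((b:Int) + (t:Int)) (PySem.List.pyGetD input ((c:Int) + (t:Int)) 0)
      = o.set (b + t) (input.getD (c + t) 0) := by
    intro o t
    rw [show ((b:Int)+(t:Int)) = ((b+t : Nat):Int) by push_cast; ring,
        show ((c:Int)+(t:Int)) = ((c+t : Nat):Int) by push_cast; ring,
        PySem.List.pyGetD_natCast, PySem.List.pySetD_of_nonneg _ _ (by positivity)]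
    rw [Int.toNat_natCast]
  simp only [hbody]
  exact writeRange 8 (fun t => input.getD (c+t) 0) b pre mid rest hpre hmid

-- One outer-loop iteration of A turns the next 64 zeros into pvBlock input i.
lemma block_step (input : List Int) (i : Nat) (pre rest : List Int) (hpre : pre.length = 64*i) :
    (PySem.List.pyRange 0 8 1).foldl (fun out j =>
      (PySem.List.pyRange 0 8 1).foldl (fun out k =>
        PySem.List.pySetD out (64 * (i : Int) + 8 * j + k)
          (PySem.List.pyGetD input (64 * (i : Int) + 8 * (8 - 1 - j) + k) 0)) out)
      (pre ++ (List.replicate 64 (0:Int) ++ rest))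
    = (pre ++ pvBlock input i) ++ rest := by
  have hr : PySem.List.pyRange 0 8 1 = [0,1,2,3,4,5,6,7] := by decide
  have hsplit : List.replicate 64 (0:Int) = List.replicate 8 (0:Int) ++ (List.replicate 8 (0:Int) ++ (List.replicate 8 (0:Int) ++ (List.replicate 8 (0:Int) ++ (List.replicate 8 (0:Int) ++ (List.replicate 8 (0:Int) ++ (List.replicate 8 (0:Int) ++ (List.replicate 8 (0:Int)))))))) := by decide
  set F : List Int → Int → List Int := fun out j =>
      (PySem.List.pyRange 0 8 1).foldl (fun out k =>
        PySem.List.pySetD out (64 * (i : Int) + 8 * j + k)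
          (PySem.List.pyGetD input (64 * (i : Int) + 8 * (8 - 1 - j) + k) 0)) out with hF
  rw [hr, hsplit]
  simp only [List.foldl_cons, List.foldl_nil, List.append_assoc, hF]
  rw [chunk_step input (64 * (i : Int) + 8 * 0) (64 * (i : Int) + 8 * (8 - 1 - 0)) (64*i) (64*i+56) (pre) (List.replicate 8 (0:Int)) (List.replicate 8 (0:Int) ++ (List.replicate 8 (0:Int) ++ (List.replicate 8 (0:Int) ++ (List.replicate 8 (0:Int) ++ (List.replicate 8 (0:Int) ++ (List.replicate 8 (0:Int) ++ (List.replicate 8 (0:Int) ++ (rest)))))))) (by push_cast; ring) (by push_cast; ring) hpre (by simp)]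
  rw [chunk_step input (64 * (i : Int) + 8 * 1) (64 * (i : Int) + 8 * (8 - 1 - 1)) (64*i+8) (64*i+48) ((pre ++ pvChunk input (64*i+56))) (List.replicate 8 (0:Int)) (List.replicate 8 (0:Int) ++ (List.replicate 8 (0:Int) ++ (List.replicate 8 (0:Int) ++ (List.replicate 8 (0:Int) ++ (List.replicate 8 (0:Int) ++ (List.replicate 8 (0:Int) ++ (rest))))))) (by push_cast; ring) (by push_cast; ring) (by simp [hpre, pvChunk_length]) (by simp)]
  rw [chunk_step input (64 * (i : Int) + 8 * 2) (64 * (i : Int) + 8 * (8 - 1 - 2)) (64*i+16) (64*i+40) (((pre ++ pvChunk input (64*i+56)) ++ pvChunk input (64*i+48))) (List.replicate 8 (0:Int)) (List.replicate 8 (0:Int) ++ (List.replicate 8 (0:Int) ++ (List.replicate 8 (0:Int) ++ (List.replicate 8 (0:Int) ++ (List.replicate 8 (0:Int) ++ (rest)))))) (by push_cast; ring) (by push_cast; ring) (by simp [hpre, pvChunk_length]) (by simp)]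
  rw [chunk_step input (64 * (i : Int) + 8 * 3) (64 * (i : Int) + 8 * (8 - 1 - 3)) (64*i+24) (64*i+32) ((((pre ++ pvChunk input (64*i+56)) ++ pvChunk input (64*i+48)) ++ pvChunk input (64*i+40))) (List.replicate 8 (0:Int)) (List.replicate 8 (0:Int) ++ (List.replicate 8 (0:Int) ++ (List.replicate 8 (0:Int) ++ (List.replicate 8 (0:Int) ++ (rest))))) (by push_cast; ring) (by push_cast; ring) (by simp [hpre, pvChunk_length]) (by simp)]
  rw [chunk_step input (64 * (i : Int) + 8 * 4) (64 * (i : Int) + 8 * (8 - 1 - 4)) (64*i+32) (64*i+24) (((((pre ++ pvChunk input (64*i+56)) ++ pvChunk input (64*i+48)) ++ pvChunk input (64*i+40)) ++ pvChunk input (64*i+32))) (List.replicate 8 (0:Int)) (List.replicate 8 (0:Int) ++ (List.replicate 8 (0:Int) ++ (List.replicate 8 (0:Int) ++ (rest)))) (by push_cast; ring) (by push_cast; ring) (by simp [hpre, pvChunk_length]) (by simp)]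
  rw [chunk_step input (64 * (i : Int) + 8 * 5) (64 * (i : Int) + 8 * (8 - 1 - 5)) (64*i+40) (64*i+16) ((((((pre ++ pvChunk input (64*i+56)) ++ pvChunk input (64*i+48)) ++ pvChunk input (64*i+40)) ++ pvChunk input (64*i+32)) ++ pvChunk input (64*i+24))) (List.replicate 8 (0:Int)) (List.replicate 8 (0:Int) ++ (List.replicate 8 (0:Int) ++ (rest))) (by push_cast; ring) (by push_cast; ring) (by simp [hpre, pvChunk_length]) (by simp)]
  rw [chunk_step input (64 * (i : Int) + 8 * 6) (64 * (i : Int) + 8 * (8 - 1 - 6)) (64*i+48) (64*i+8) (((((((pre ++ pvChunk input (64*i+56)) ++ pvChunk input (64*i+48)) ++ pvChunk input (64*i+40)) ++ pvChunk input (64*i+32)) ++ pvChunk input (64*i+24)) ++ pvChunk input (64*i+16))) (List.replicate 8 (0:Int)) (List.replicate 8 (0:Int) ++ (rest)) (by push_cast; ring) (by push_cast; ring) (by simp [hpre, pvChunk_length]) (by simp)]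
  rw [chunk_step input (64 * (i : Int) + 8 * 7) (64 * (i : Int) + 8 * (8 - 1 - 7)) (64*i+56) (64*i) ((((((((pre ++ pvChunk input (64*i+56)) ++ pvChunk input (64*i+48)) ++ pvChunk input (64*i+40)) ++ pvChunk input (64*i+32)) ++ pvChunk input (64*i+24)) ++ pvChunk input (64*i+16)) ++ pvChunk input (64*i+8))) (List.replicate 8 (0:Int)) (rest) (by push_cast; ring) (by push_cast; ring) (by simp [hpre, pvChunk_length]) (by simp)]
  simp [pvBlock, List.append_assoc]

lemma A_loop (input : List Int) : ∀ (m : Nat), 64*m ≤ input.length →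
    (List.range m).foldl (fun out (i : Nat) =>
      (PySem.List.pyRange 0 8 1).foldl (fun out j =>
        (PySem.List.pyRange 0 8 1).foldl (fun out k =>
          PySem.List.pySetD out (64 * (i : Int) + 8 * j + k)
            (PySem.List.pyGetD input (64 * (i : Int) + 8 * (8 - 1 - j) + k) 0)) out) out)
      (List.replicate input.length (0:Int))
    = ((List.range m).flatMap (pvBlock input)) ++ List.replicate (input.length - 64*m) (0:Int) := by
  intro m
  induction m with
  | zero => intro _; simp
  | succ m ih =>
    intro h
    rw [List.range_succ, List.foldl_append, ih (by omega), List.foldl_cons, List.foldl_nil]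
    rw [show input.length - 64*m = 64 + (input.length - 64*(m+1)) from by omega,
      List.replicate_add]
    rw [block_step input m _ _ (flat_length input m)]
    simp [List.flatMap_append, List.append_assoc]

lemma A_eq (input : List Int) :
    change_bit_endianness input
    = ((List.range (input.length / 64)).flatMap (pvBlock input))
        ++ List.replicate (input.length - 64*(input.length / 64)) (0:Int) := by
  simp only [change_bit_endianness]
  rw [show PySem.Int.floordiv (input.length : Int) 64 = ((input.length / 64 : Nat) : Int) from by
    exact_mod_cast PySem.Int.floordiv_natCast input.length 64]
  rw [PySem.List.pyRange_zero_natCast, List.foldl_map]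
  exact A_loop input (input.length / 64) (by omega)

lemma chunk_take (input : List Int) (c : Nat) (h : c + 8 ≤ input.length) :
    List.take 8 (List.drop c input) = pvChunk input c := by
  apply List.ext_getElem
  · simp [pvChunk]; omega
  · intro t h1 h2
    simp only [pvChunk, List.getElem_take, List.getElem_drop, List.getElem_map, List.getElem_range]
    rw [List.getD_eq_getElem _ _ (by simp at h1 ⊢; omega)]

lemma slice_take_chunk (input : List Int) (i off : Nat) (hoff : off + 8 ≤ 64)
    (h : 64*i + 64 ≤ input.length) :
    PySem.List.slice (List.take 64 (List.drop (64*i) input))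
      (some ((off : Nat) : Int)) (some (((off : Nat) : Int) + 8))
    = pvChunk input (64*i + off) := by
  rw [show (((off:Nat):Int) + 8) = ((off + 8 : Nat) : Int) by push_cast; ring,
    PySem.List.slice_natCast, List.drop_take, List.drop_drop, List.take_take]
  rw [show off + 8 - off = 8 from by omega, show min 8 (64 - off) = 8 from by omega,
    show 64*i + off = off + 64*i from by omega]
  exact chunk_take input (off + 64*i) (by omega)

lemma B_block (input : List Int) (i : Nat) (h : 64*i + 64 ≤ input.length) (out : List Int) :
    (PySem.List.pyRange 7 (-1) (-1)).foldl (fun out j =>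
      out ++ PySem.List.slice
        (PySem.List.slice input (some (64 * (i : Int))) (some (64 * ((i : Int) + 1))))
        (some (8 * j)) (some (8 * j + 8))) out
    = out ++ pvBlock input i := by
  have hr : PySem.List.pyRange 7 (-1) (-1) = [7,6,5,4,3,2,1,0] := by decide
  have hblock : PySem.List.slice input (some (64 * (i : Int))) (some (64 * ((i : Int) + 1)))
      = List.take 64 (List.drop (64*i) input) := by
    rw [show (64 * ((i:Int)+1)) = ((64*i + 64 : Nat) : Int) by push_cast; ring,
      show (64 * (i:Int)) = ((64*i : Nat) : Int) by push_cast; ring,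
      PySem.List.slice_natCast]
    congr 1
    omega
  rw [hr, hblock]
  simp only [List.foldl_cons, List.foldl_nil]
  rw [show ((8:Int) * 7) = ((56:Nat):Int) by norm_num]
  rw [show ((8:Int) * 6) = ((48:Nat):Int) by norm_num]
  rw [show ((8:Int) * 5) = ((40:Nat):Int) by norm_num]
  rw [show ((8:Int) * 4) = ((32:Nat):Int) by norm_num]
  rw [show ((8:Int) * 3) = ((24:Nat):Int) by norm_num]
  rw [show ((8:Int) * 2) = ((16:Nat):Int) by norm_num]
  rw [show ((8:Int) * 1) = ((8:Nat):Int) by norm_num]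
  rw [show ((8:Int) * 0) = ((0:Nat):Int) by norm_num]
  rw [slice_take_chunk input i 56 (by norm_num) h,
      slice_take_chunk input i 48 (by norm_num) h,
      slice_take_chunk input i 40 (by norm_num) h,
      slice_take_chunk input i 32 (by norm_num) h,
      slice_take_chunk input i 24 (by norm_num) h,
      slice_take_chunk input i 16 (by norm_num) h,
      slice_take_chunk input i 8 (by norm_num) h,
      slice_take_chunk input i 0 (by norm_num) h]
  simp [pvBlock, List.append_assoc]

lemma B_eq (input : List Int) :
    change_bit_endianness_alt input
    = ((List.range (input.length / 64)).flatMap (pvBlock input))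
        ++ List.replicate (input.length - 64*(input.length / 64)) (0:Int) := by
  simp only [change_bit_endianness_alt]
  rw [show PySem.Int.floordiv (input.length : Int) 64 = ((input.length / 64 : Nat) : Int) from by
    exact_mod_cast PySem.Int.floordiv_natCast input.length 64]
  rw [PySem.List.pyRange_zero_natCast, List.foldl_map]
  rw [PySem.List.foldl_congr_mem (List.range (input.length / 64)) _
    (fun out (i : Nat) => out ++ pvBlock input i) []
    (by
      intro acc i hi
      simp only []
      exact B_block input i (by simp at hi; omega) acc)]
  rw [PySem.List.foldl_append_eq_flatMap]
  simp only [List.nil_append]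
  congr 1
  congr 1
  omega

-- ===== VERDICT (by name: the statement is the Claim_ definition above) =====
theorem change_bit_endianness_spec : Claim_equal_change_bit_endianness := by
  intro input _
  unfold Spec_change_bit_endianness
  rw [A_eq, B_eq]
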